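-- pv_equiv track=rewrite | github.com/Blessedopera/orchedit1 | orchestra/agents/workflow_composer.py | _identify_workflow_patterns
-- ===== SOURCE A (Python) =====
-- from typing import Dict, Any, List, Optional
--
-- def _identify_workflow_patterns(nodes_info: List[Dict]) -> List[str]:
--     """Identify common workflow patterns possible with available nodes"""
--     patterns = []
--
--     node_types = [n.get("node_type", "") for n in nodes_info if "error" not in n]
--
--     if "scraper" in node_types and "processor" in node_types:
--         patterns.append("web_scraping_to_analysis")
--     if any("news" in n.get("description", "").lower() for n in nodes_info):
--         patterns.append("news_monitoring_pipeline")
--     if any("ai" in n.get("description", "").lower() for n in nodes_info):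
--         patterns.append("ai_content_processing")
--
--     return patterns
-- ===== SOURCE B (Python) =====
-- def _identify_workflow_patterns(nodes_info):
--     """Identify common workflow patterns possible with available nodes"""
--     has_scraper = False
--     has_processor = False
--     has_news = False
--     has_ai = False
--     for node in nodes_info:
--         if "error" not in node:
--             t = node.get("node_type", "")
--             if t == "scraper":
--                 has_scraper = True
--             if t == "processor":
--                 has_processor = True
--         desc = node.get("description", "").lower()
--         if "news" in desc:
--             has_news = True
--         if "ai" in desc:
--             has_ai = True
--     patterns = []
--     if has_scraper and has_processor:
--         patterns.append("web_scraping_to_analysis")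
--     if has_news:
--         patterns.append("news_monitoring_pipeline")
--     if has_ai:
--         patterns.append("ai_content_processing")
--     return patterns
-- ===== Notes on version B (the rewrite author's own statement) =====
-- stated objective: alternative
-- what changed: Replaces the intermediate node_types list and the three separate scans (one list comprehension plus two any() generators) with a single pass over nodes_info maintaining four boolean flags, assembling the pattern list afterwards.
import Mathlib
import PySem

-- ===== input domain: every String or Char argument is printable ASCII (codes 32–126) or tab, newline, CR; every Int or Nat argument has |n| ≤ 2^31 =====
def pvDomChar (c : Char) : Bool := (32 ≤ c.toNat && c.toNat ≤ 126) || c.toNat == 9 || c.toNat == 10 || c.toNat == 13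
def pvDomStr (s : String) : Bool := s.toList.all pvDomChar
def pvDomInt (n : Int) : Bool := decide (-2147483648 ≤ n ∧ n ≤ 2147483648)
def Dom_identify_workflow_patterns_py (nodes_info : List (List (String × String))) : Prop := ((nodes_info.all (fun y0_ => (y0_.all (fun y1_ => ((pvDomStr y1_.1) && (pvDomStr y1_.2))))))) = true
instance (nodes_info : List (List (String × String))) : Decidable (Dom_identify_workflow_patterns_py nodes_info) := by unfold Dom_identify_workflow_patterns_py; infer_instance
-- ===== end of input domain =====

-- B replaces A's intermediate node_types list and three separate scans with one pass
-- maintaining four boolean flags (alternative decomposition; same asymptotic cost).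

-- ===== PORT A =====
def identify_workflow_patterns_py (nodes_info : List (List (String × String))) : List String :=
  let node_types :=
    (nodes_info.filter (fun n => !(PySem.Dict.mk n).contains "error")).map
      (fun n => (PySem.Dict.mk n).getD "node_type" "")
  let patterns : List String := []
  let patterns :=
    if node_types.contains "scraper" && node_types.contains "processor" then
      patterns ++ ["web_scraping_to_analysis"]
    else patterns
  let patterns :=
    if nodes_info.any (fun n =>
        PySem.Str.isIn "news" (PySem.Str.lower ((PySem.Dict.mk n).getD "description" ""))) then
      patterns ++ ["news_monitoring_pipeline"]
    else patterns
  let patterns :=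
    if nodes_info.any (fun n =>
        PySem.Str.isIn "ai" (PySem.Str.lower ((PySem.Dict.mk n).getD "description" ""))) then
      patterns ++ ["ai_content_processing"]
    else patterns
  patterns

-- ===== PORT B =====
-- one step of B's loop over a node, updating (has_scraper, has_processor, has_news, has_ai)
def altStep (st : Bool × Bool × Bool × Bool) (n : List (String × String)) :
    Bool × Bool × Bool × Bool :=
  let st :=
    if !(PySem.Dict.mk n).contains "error" then
      let t := (PySem.Dict.mk n).getD "node_type" ""
      let st := if t == "scraper" then (true, st.2.1, st.2.2.1, st.2.2.2) else st
      if t == "processor" then (st.1, true, st.2.2.1, st.2.2.2) else st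
    else st
  let desc := PySem.Str.lower ((PySem.Dict.mk n).getD "description" "")
  let st := if PySem.Str.isIn "news" desc then (st.1, st.2.1, true, st.2.2.2) else st
  if PySem.Str.isIn "ai" desc then (st.1, st.2.1, st.2.2.1, true) else st

def identify_workflow_patterns_py_alt (nodes_info : List (List (String × String))) : List String :=
  let flags := nodes_info.foldl altStep (false, false, false, false)
  let patterns : List String := []
  let patterns := if flags.1 && flags.2.1 then patterns ++ ["web_scraping_to_analysis"] else patterns
  let patterns := if flags.2.2.1 then patterns ++ ["news_monitoring_pipeline"] else patterns
  if flags.2.2.2 then patterns ++ ["ai_content_processing"] else patterns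

-- ===== PRECONDITION & SPEC =====
def Spec_identify_workflow_patterns_py (nodes_info : List (List (String × String))) (out : List String) : Prop := out = identify_workflow_patterns_py_alt nodes_info
instance (nodes_info : List (List (String × String))) (out : List String) : Decidable (Spec_identify_workflow_patterns_py nodes_info out) := by unfold Spec_identify_workflow_patterns_py; infer_instance

-- ===== CLAIM (what is proved, stated in full; the proofs are below) =====
def Claim_equal_identify_workflow_patterns_py : Prop := ∀ (nodes_info : List (List (String × String))), Dom_identify_workflow_patterns_py nodes_info → Spec_identify_workflow_patterns_py nodes_info (identify_workflow_patterns_py nodes_info)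

-- ===== LEMMAS AND PROOFS =====

def pScraper (n : List (String × String)) : Bool :=
  !(PySem.Dict.mk n).contains "error" && ((PySem.Dict.mk n).getD "node_type" "" == "scraper")
def pProcessor (n : List (String × String)) : Bool :=
  !(PySem.Dict.mk n).contains "error" && ((PySem.Dict.mk n).getD "node_type" "" == "processor")
def pNews (n : List (String × String)) : Bool :=
  PySem.Str.isIn "news" (PySem.Str.lower ((PySem.Dict.mk n).getD "description" ""))
def pAi (n : List (String × String)) : Bool :=
  PySem.Str.isIn "ai" (PySem.Str.lower ((PySem.Dict.mk n).getD "description" ""))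

lemma altStep_eq (st : Bool × Bool × Bool × Bool) (n : List (String × String)) :
    altStep st n = (st.1 || pScraper n, st.2.1 || pProcessor n,
                    st.2.2.1 || pNews n, st.2.2.2 || pAi n) := by
  obtain ⟨a, b, c, d⟩ := st
  simp only [altStep, pScraper, pProcessor, pNews, pAi]
  generalize (PySem.Dict.mk n).contains "error" = e
  generalize ((PySem.Dict.mk n).getD "node_type" "" == "scraper") = sc
  generalize ((PySem.Dict.mk n).getD "node_type" "" == "processor") = pr
  generalize PySem.Str.isIn "news" (PySem.Str.lower ((PySem.Dict.mk n).getD "description" "")) = w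
  generalize PySem.Str.isIn "ai" (PySem.Str.lower ((PySem.Dict.mk n).getD "description" "")) = i
  revert a b c d
  cases e <;> cases sc <;> cases pr <;> cases w <;> cases i <;> decide

lemma foldl_altStep (l : List (List (String × String))) (a b c d : Bool) :
    l.foldl altStep (a, b, c, d) =
      (a || l.any pScraper, b || l.any pProcessor, c || l.any pNews, d || l.any pAi) := by
  induction l generalizing a b c d with
  | nil => simp
  | cons x xs ih =>
    simp only [List.foldl_cons, altStep_eq, List.any_cons, ih, Bool.or_assoc]

lemma contains_filter_map (l : List (List (String × String))) (v : String)
    (q : List (String × String) → Bool) (f : List (String × String) → String) :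
    ((l.filter q).map f).contains v = l.any (fun n => q n && (f n == v)) := by
  induction l with
  | nil => rfl
  | cons x xs ih =>
    by_cases h : q x = true
    · simp only [List.filter_cons, List.map_cons, List.contains_cons, ih,
        List.any_cons, h, if_true, Bool.true_and, BEq.comm]
    · have h' : q x = false := by revert h; cases q x <;> simp
      simp only [List.filter_cons, h', Bool.false_eq_true, if_false, ih, List.any_cons, Bool.false_and,
        Bool.false_or]

-- ===== VERDICT (by name: the statement is the Claim_ definition above) =====
theorem identify_workflow_patterns_py_spec : Claim_equal_identify_workflow_patterns_py := by
  intro nodes_info _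
  show _ = _
  simp only [identify_workflow_patterns_py, identify_workflow_patterns_py_alt,
    foldl_altStep, contains_filter_map, Bool.false_or]
  rfl
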